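-- pv_equiv track=rewrite | github.com/blameitonme1/d2lPytorch | RNN/machine-translation-dataset.py | preprocess_nmt
-- ===== SOURCE A (Python) =====
-- def preprocess_nmt(text):
--     def no_space(char, prev_char):
--         """ 将标点符号单独拿出来 """
--         return char in set(',.!?') and prev_char != ' '
--
--     text = text.replace('\u202f', ' ').replace('\xa0', ' ').lower()
--     out = [' ' + char if i > 0 and no_space(char, text[i - 1]) else char
--            for i, char in enumerate(text)]
--     """out is now a list, need to transform to a string"""
--     return ''.join(out)
-- ===== SOURCE B (Python) =====
-- import re
--
-- def preprocess_nmt(text):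
--     text = text.replace('\u202f', ' ').replace('\xa0', ' ').lower()
--     # a punctuation char preceded by a non-space char gets a space inserted before it;
--     # the lookbehind cannot match at position 0, like A's `i > 0` guard
--     return re.sub(r'(?<=[^ ])([,.!?])', r' \1', text)
-- ===== Notes on version B (the rewrite author's own statement) =====
-- stated objective: idiomatic
-- what changed: Replaces the enumerate list-comprehension with per-index lookback by a single regex substitution (lookbehind for a non-space char before one of the four punctuation chars) after the same normalisation.
import Mathlib
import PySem

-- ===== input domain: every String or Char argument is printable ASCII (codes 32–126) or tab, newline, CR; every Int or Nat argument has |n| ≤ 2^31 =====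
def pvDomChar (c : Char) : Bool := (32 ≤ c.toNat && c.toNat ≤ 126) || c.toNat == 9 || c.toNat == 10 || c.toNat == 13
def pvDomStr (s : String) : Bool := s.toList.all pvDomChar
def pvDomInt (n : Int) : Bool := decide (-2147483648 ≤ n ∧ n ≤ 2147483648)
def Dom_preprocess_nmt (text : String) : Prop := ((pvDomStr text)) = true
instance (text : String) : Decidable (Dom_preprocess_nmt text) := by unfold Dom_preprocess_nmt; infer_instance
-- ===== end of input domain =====

-- B replaces A's enumerate comprehension (indexed lookback) by a regex substitution; same result, idiomatic.


-- ===== PORT A =====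
-- char in set(',.!?') and prev_char != ' '
def pvNoSpace (ch prev : Char) : Bool :=
  (PySem.Set.ofList [',', '.', '!', '?']).contains ch && prev != ' '

-- normalisation shared by both sources: .replace('\u202f',' ').replace('\xa0',' ').lower()
def pvNormalize (text : String) : List Char :=
  PySem.Chars.lower
    (PySem.Chars.replace (PySem.Chars.replace text.toList [Char.ofNat 0x202f] [' '])
      [Char.ofNat 0xa0] [' '])

def preprocess_nmt (text : String) : String :=
  let t := pvNormalize text
  -- the comprehension builds a list of one/two-char strings; ''.join = flatten
  let out : List (List Char) :=
    (PySem.List.enumerate t).map (fun p =>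
      if p.1 > 0 && pvNoSpace p.2 (PySem.List.pyGetD t (p.1 - 1) ' ') then
        [' ', p.2]
      else [p.2])
  String.ofList out.flatten

-- ===== PORT B =====
-- Hand-port of re.sub(r'(?<=[^ ])([,.!?])', r' \1', text) for this fixed pattern, exact on all
-- strings: re.sub scans the input left to right; a match is one of , . ! ? whose zero-width
-- lookbehind requires the previous INPUT char to exist and differ from ' ' (so never at position 0),
-- and the replacement inserts a space before it. The scan carries the previous input char.
def pvReSubPunct : Char → List Char → List Char
  | _, [] => []
  | prev, c :: rest =>
    if (c == ',' || c == '.' || c == '!' || c == '?') && prev != ' ' then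
      ' ' :: c :: pvReSubPunct c rest
    else
      c :: pvReSubPunct c rest

def preprocess_nmt_alt (text : String) : String :=
  let t := pvNormalize text
  match t with
  | [] => String.ofList []
  | c :: rest => String.ofList (c :: pvReSubPunct c rest)

-- ===== PRECONDITION & SPEC =====
def Spec_preprocess_nmt (text : String) (out : String) : Prop := out = preprocess_nmt_alt text
instance (text : String) (out : String) : Decidable (Spec_preprocess_nmt text out) := by unfold Spec_preprocess_nmt; infer_instance

-- ===== CLAIM (what is proved, stated in full; the proofs are below) =====
def Claim_equal_preprocess_nmt : Prop := ∀ (text : String), Dom_preprocess_nmt text → Spec_preprocess_nmt text (preprocess_nmt text)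

-- ===== LEMMAS AND PROOFS =====

-- A's membership test in set(',.!?') spelled as B's chained comparisons.
theorem pvNoSpace_eq (c prev : Char) :
    pvNoSpace c prev = ((c == ',' || c == '.' || c == '!' || c == '?') && prev != ' ') := by
  simp only [pvNoSpace, PySem.Set.ofList]
  cases h1 : c == ',' <;> cases h2 : c == '.' <;> cases h3 : c == '!' <;> cases h4 : c == '?' <;> simp_all

-- A's comprehension over the tail of t, with the global index and t-lookback, equals B's scan.
theorem pv_tail_eq (t : List Char) :
    ∀ (l : List Char) (n : Nat) (prev : Char), t.drop n = prev :: l →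
      (List.map (fun p : Int × Char =>
          if p.1 > 0 && pvNoSpace p.2 (PySem.List.pyGetD t (p.1 - 1) ' ') then
            [' ', p.2] else [p.2])
        (PySem.List.enumerate l ((n : Int) + 1))).flatten
      = pvReSubPunct prev l := by
  intro l
  induction l with
  | nil => intro n prev _; simp [PySem.List.enumerate, pvReSubPunct]
  | cons c rest ih =>
    intro n prev hd
    have hprev : PySem.List.pyGetD t ((n : Int)) ' ' = prev := by
      have h1 : t[n]? = some prev := by
        have h := congrArg (·[0]?) hd
        simpa [List.getElem?_drop] using h
      rw [PySem.List.pyGetD_natCast]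
      simp [List.getD, h1]
    have hd' : t.drop (n + 1) = c :: rest := by
      have h2 : t.drop (n + 1) = (t.drop n).tail := by rw [List.tail_drop]
      rw [h2, hd]; rfl
    have ihc := ih (n + 1) c hd'
    simp only [PySem.List.enumerate, List.map_cons, List.flatten_cons]
    have e1 : ((n : Int) + 1 - 1) = (n : Int) := by ring
    rw [e1, hprev]
    have hpos : ((n : Int) + 1 > 0) := by omega
    push_cast at ihc ⊢
    rw [ihc]
    rw [pvNoSpace_eq]
    simp only [hpos, decide_true, Bool.true_and, pvReSubPunct]
    cases hcond : ((c == ',' || c == '.' || c == '!' || c == '?') && prev != ' ') <;> simp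

-- ===== VERDICT (by name: the statement is the Claim_ definition above) =====
theorem preprocess_nmt_spec : Claim_equal_preprocess_nmt := by
  intro text _
  unfold Spec_preprocess_nmt preprocess_nmt preprocess_nmt_alt
  cases ht : pvNormalize text with
  | nil => simp [PySem.List.enumerate]
  | cons c rest =>
    have h0 := pv_tail_eq (c :: rest) rest 0 c (by simp)
    simp only [PySem.List.enumerate, List.map_cons, List.flatten_cons]
    push_cast at h0 ⊢
    rw [h0]
    simp
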